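-- pv_equiv track=rewrite | github.com/shaoairai/autowp | backend/routes/generate.py | _normalize_commas
-- ===== SOURCE A (Python) =====
-- def _normalize_commas(content):
--     """Replace half-width commas with full-width commas in text content only.
--
--     Skips commas inside HTML tags and Gutenberg block comments.
--     """
--     result = []
--     i = 0
--     while i < len(content):
--         # Skip Gutenberg comments <!-- ... -->
--         if content[i:i+4] == '<!--':
--             end = content.find('-->', i + 4)
--             if end == -1:
--                 result.append(content[i:])
--                 break
--             result.append(content[i:end+3])
--             i = end + 3
--         # Skip HTML tags < ... >
--         elif content[i] == '<':
--             end = content.find('>', i + 1)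
--             if end == -1:
--                 result.append(content[i:])
--                 break
--             result.append(content[i:end+1])
--             i = end + 1
--         # Text content: replace half-width comma
--         elif content[i] == ',':
--             result.append('，')
--             i += 1
--         else:
--             result.append(content[i])
--             i += 1
--     return ''.join(result)
-- ===== SOURCE B (Python) =====
-- def _normalize_commas(content):
--     """Replace half-width commas with full-width ones in text content only.
--
--     Single-pass character state machine: states track whether we are in plain
--     text, just after '<' (matching a possible '<!--' opener), inside a tag, or
--     inside a comment (with the count of trailing dashes, capped at 2).  Every
--     character is emitted verbatim except a comma seen in the TEXT state.
--     """
--     TEXT, O1, O2, O3, TAG, C0, C1, C2 = range(8)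
--     st = TEXT
--     out = []
--     for c in content:
--         if st == TEXT:
--             if c == '<':
--                 st = O1
--                 out.append(c)
--             elif c == ',':
--                 out.append('，')
--             else:
--                 out.append(c)
--         else:
--             out.append(c)
--             if st == O1:
--                 st = O2 if c == '!' else (TEXT if c == '>' else TAG)
--             elif st == O2:
--                 st = O3 if c == '-' else (TEXT if c == '>' else TAG)
--             elif st == O3:
--                 st = C0 if c == '-' else (TEXT if c == '>' else TAG)
--             elif st == TAG:
--                 st = TEXT if c == '>' else TAG
--             elif st == C0:
--                 st = C1 if c == '-' else C0
--             elif st == C1: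
--                 st = C2 if c == '-' else C0
--             else:  # C2
--                 st = TEXT if c == '>' else (C2 if c == '-' else C0)
--     return ''.join(out)
-- ===== Notes on version B (the rewrite author's own statement) =====
-- stated objective: alternative
-- what changed: A jumps through the string with str.find and per-character slicing/appends; B is a single-pass character-level finite state machine (8 states) that emits every character verbatim except commas seen in the text state.
import Mathlib
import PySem

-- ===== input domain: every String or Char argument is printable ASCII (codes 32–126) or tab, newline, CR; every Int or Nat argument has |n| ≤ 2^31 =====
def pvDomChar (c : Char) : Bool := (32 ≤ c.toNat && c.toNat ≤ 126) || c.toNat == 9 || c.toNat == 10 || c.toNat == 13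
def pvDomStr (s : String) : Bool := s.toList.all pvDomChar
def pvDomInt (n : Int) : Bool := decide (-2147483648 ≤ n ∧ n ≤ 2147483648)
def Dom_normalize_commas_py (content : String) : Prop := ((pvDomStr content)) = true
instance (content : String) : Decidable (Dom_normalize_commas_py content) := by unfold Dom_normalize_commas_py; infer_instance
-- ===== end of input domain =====

-- B replaces A's find-and-slice skipping by a single-pass character state machine (different algorithm; a timing run measured it constant-factor faster).

-- ===== PORT A =====
-- exact port of str.find(pat, i) restricted to the suffix: first index where pat occurs, none if absent
def findSub (pat : List Char) : List Char → Option Nat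
  | [] => none
  | c :: cs => if pat.isPrefixOf (c :: cs) then some 0 else (findSub pat cs).map (· + 1)

def normA : List Char → List Char
  | [] => []
  | c :: cs =>
    if (c :: cs).take 4 = ['<', '!', '-', '-'] then
      match findSub ['-', '-', '>'] ((c :: cs).drop 4) with
      | none => c :: cs
      | some k => (c :: cs).take (7 + k) ++ normA ((c :: cs).drop (7 + k))
    else if c = '<' then
      match findSub ['>'] cs with
      | none => c :: cs
      | some k => (c :: cs).take (k + 2) ++ normA ((c :: cs).drop (k + 2))
    else if c = ',' then '，' :: normA cs
    else c :: normA cs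
termination_by l => l.length
decreasing_by all_goals (simp_all; try omega)

def normalize_commas_py (content : String) : String :=
  String.ofList (normA content.toList)

-- ===== PORT B =====
-- states: 0 TEXT, 1 saw '<', 2 saw '<!', 3 saw '<!-', 4 inside tag, 5/6/7 inside comment with 0/1/2 trailing dashes
def stepB (st : Nat) (c : Char) : Nat × Char :=
  if st = 0 then
    if c = '<' then (1, c) else if c = ',' then (0, '，') else (0, c)
  else
    (if st = 1 then (if c = '!' then 2 else if c = '>' then 0 else 4)
     else if st = 2 then (if c = '-' then 3 else if c = '>' then 0 else 4)
     else if st = 3 then (if c = '-' then 5 else if c = '>' then 0 else 4)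
     else if st = 4 then (if c = '>' then 0 else 4)
     else if st = 5 then (if c = '-' then 6 else 5)
     else if st = 6 then (if c = '-' then 7 else 5)
     else (if c = '>' then 0 else if c = '-' then 7 else 5), c)

def runB (st : Nat) : List Char → List Char
  | [] => []
  | c :: cs => (stepB st c).2 :: runB (stepB st c).1 cs

def normalize_commas_py_alt (content : String) : String :=
  String.ofList (runB 0 content.toList)

-- ===== PRECONDITION & SPEC =====
def Spec_normalize_commas_py (content : String) (out : String) : Prop := out = normalize_commas_py_alt content
instance (content : String) (out : String) : Decidable (Spec_normalize_commas_py content out) := by unfold Spec_normalize_commas_py; infer_instance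

-- ===== CLAIM (what is proved, stated in full; the proofs are below) =====
def Claim_equal_normalize_commas_py : Prop := ∀ (content : String), Dom_normalize_commas_py content → Spec_normalize_commas_py content (normalize_commas_py content)

-- ===== LEMMAS AND PROOFS =====

-- result of the tag-skipping phase: verbatim up to and including the first '>', then back to TEXT
def tagRes (cs : List Char) : List Char :=
  match findSub ['>'] cs with
  | none => cs
  | some k => cs.take (k + 1) ++ runB 0 (cs.drop (k + 1))

-- result of the comment phase entered with d trailing dashes already seen
def comRes (d : Nat) (cs : List Char) : List Char :=
  match findSub ['-', '-', '>'] (List.replicate d '-' ++ cs) with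
  | none => cs
  | some k => cs.take (k + 3 - d) ++ runB 0 (cs.drop (k + 3 - d))

theorem runB_cons (st : Nat) (c : Char) (cs : List Char) :
    runB st (c :: cs) = (stepB st c).2 :: runB (stepB st c).1 cs := rfl

theorem prefixOf_cons_false {p c : Char} (ps cs : List Char) (h : ¬ c = p) :
    (p :: ps).isPrefixOf (c :: cs) = false := by
  simp [List.isPrefixOf]
  intro h'
  exact absurd h'.symm h

theorem prefixOf_cons_same (p : Char) (ps cs : List Char) :
    (p :: ps).isPrefixOf (p :: cs) = ps.isPrefixOf cs := by
  simp [List.isPrefixOf]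

theorem findSub_cons_false {pat : List Char} {c : Char} {cs : List Char}
    (h : pat.isPrefixOf (c :: cs) = false) :
    findSub pat (c :: cs) = (findSub pat cs).map (· + 1) := by
  simp [findSub, h]

theorem findSub_cons_true {pat : List Char} {c : Char} {cs : List Char}
    (h : pat.isPrefixOf (c :: cs) = true) :
    findSub pat (c :: cs) = some 0 := by
  simp [findSub, h]

-- shift lemmas for tagRes
theorem tagRes_cons {c : Char} (t : List Char) (h : ¬ c = '>') :
    tagRes (c :: t) = c :: tagRes t := by
  have h1 : (['>'] : List Char).isPrefixOf (c :: t) = false := prefixOf_cons_false [] t h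
  simp only [tagRes, findSub_cons_false h1]
  cases findSub ['>'] t with
  | none => simp
  | some k => simp [List.take_succ_cons, List.drop_succ_cons]

theorem tagRes_gt (t : List Char) : tagRes ('>' :: t) = '>' :: runB 0 t := by
  have hp : (['>'] : List Char).isPrefixOf ('>' :: t) = true := by simp [List.isPrefixOf]
  simp [tagRes, findSub_cons_true hp]

-- shift lemmas for comRes (the comment automaton vs the '-->' substring search)
theorem comRes0_dash (t : List Char) : comRes 0 ('-' :: t) = '-' :: comRes 1 t := by
  simp only [comRes, List.replicate, List.nil_append, List.cons_append]
  cases findSub ['-', '-', '>'] ('-' :: t) with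
  | none => simp
  | some k =>
    simp only []
    rw [show k + 3 - 0 = (k + 3 - 1) + 1 by omega, List.take_succ_cons, List.drop_succ_cons]
    simp

theorem comRes0_other {c : Char} (t : List Char) (h : ¬ c = '-') :
    comRes 0 (c :: t) = c :: comRes 0 t := by
  have h1 : (['-', '-', '>'] : List Char).isPrefixOf (c :: t) = false :=
    prefixOf_cons_false _ t h
  simp only [comRes, List.replicate, List.nil_append, findSub_cons_false h1]
  cases findSub ['-', '-', '>'] t with
  | none => simp
  | some k => simp [List.take_succ_cons, List.drop_succ_cons]

theorem comRes1_dash (t : List Char) : comRes 1 ('-' :: t) = '-' :: comRes 2 t := by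
  simp only [comRes, List.replicate, List.nil_append, List.cons_append]
  cases findSub ['-', '-', '>'] ('-' :: '-' :: t) with
  | none => simp
  | some k =>
    simp only []
    rw [show k + 3 - 1 = (k + 3 - 2) + 1 by omega, List.take_succ_cons, List.drop_succ_cons]
    simp

theorem comRes1_other {c : Char} (t : List Char) (h : ¬ c = '-') :
    comRes 1 (c :: t) = c :: comRes 0 t := by
  have h2 : (['-', '-', '>'] : List Char).isPrefixOf ('-' :: c :: t) = false := by
    rw [prefixOf_cons_same]; exact prefixOf_cons_false _ t h
  have h1 : (['-', '-', '>'] : List Char).isPrefixOf (c :: t) = false :=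
    prefixOf_cons_false _ t h
  simp only [comRes, List.replicate, List.nil_append, List.cons_append,
    findSub_cons_false h2, findSub_cons_false h1, Option.map_map]
  cases findSub ['-', '-', '>'] t with
  | none => simp
  | some k =>
    simp only [Option.map_some, Function.comp_apply]
    rw [show k + 1 + 1 + 3 - 1 = (k + 3) + 1 by omega, List.take_succ_cons,
      List.drop_succ_cons]
    simp

theorem comRes2_dash (t : List Char) : comRes 2 ('-' :: t) = '-' :: comRes 2 t := by
  have h3 : (['-', '-', '>'] : List Char).isPrefixOf ('-' :: '-' :: '-' :: t) = false := by
    rw [prefixOf_cons_same, prefixOf_cons_same]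
    exact prefixOf_cons_false _ t (by decide)
  simp only [comRes, List.replicate, List.nil_append, List.cons_append,
    findSub_cons_false h3]
  cases findSub ['-', '-', '>'] ('-' :: '-' :: t) with
  | none => simp
  | some k =>
    simp only [Option.map_some]
    rw [show k + 1 + 3 - 2 = (k + 3 - 2) + 1 by omega, List.take_succ_cons,
      List.drop_succ_cons]
    simp

theorem comRes2_gt (t : List Char) : comRes 2 ('>' :: t) = '>' :: runB 0 t := by
  have hp : (['-', '-', '>'] : List Char).isPrefixOf ('-' :: '-' :: '>' :: t) = true := by
    simp [List.isPrefixOf]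
  simp [comRes, List.replicate, findSub_cons_true hp]

theorem comRes2_other {c : Char} (t : List Char) (hg : ¬ c = '>') (hd : ¬ c = '-') :
    comRes 2 (c :: t) = c :: comRes 0 t := by
  have h3 : (['-', '-', '>'] : List Char).isPrefixOf ('-' :: '-' :: c :: t) = false := by
    rw [prefixOf_cons_same, prefixOf_cons_same]
    exact prefixOf_cons_false _ t hg
  have h2 : (['-', '-', '>'] : List Char).isPrefixOf ('-' :: c :: t) = false := by
    rw [prefixOf_cons_same]; exact prefixOf_cons_false _ t hd
  have h1 : (['-', '-', '>'] : List Char).isPrefixOf (c :: t) = false :=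
    prefixOf_cons_false _ t hd
  simp only [comRes, List.replicate, List.nil_append, List.cons_append,
    findSub_cons_false h3, findSub_cons_false h2, findSub_cons_false h1, Option.map_map]
  cases findSub ['-', '-', '>'] t with
  | none => simp
  | some k =>
    simp only [Option.map_some, Function.comp_apply]
    rw [show k + 1 + 1 + 1 + 3 - 2 = (k + 3) + 1 by omega, List.take_succ_cons,
      List.drop_succ_cons]
    simp

theorem runB_tag : ∀ cs : List Char, runB 4 cs = tagRes cs := by
  intro cs
  induction cs with
  | nil => simp [tagRes, findSub, runB]
  | cons c t ih =>
    by_cases h : c = '>'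
    · subst h
      rw [show runB 4 ('>' :: t) = '>' :: runB 0 t from rfl, tagRes_gt]
    · rw [runB_cons]
      have hs : stepB 4 c = (4, c) := by simp [stepB, h]
      rw [hs, ih, tagRes_cons t h]

theorem runB_com : ∀ cs : List Char,
    runB 5 cs = comRes 0 cs ∧ runB 6 cs = comRes 1 cs ∧ runB 7 cs = comRes 2 cs := by
  intro cs
  induction cs with
  | nil => refine ⟨?_, ?_, ?_⟩ <;> simp [comRes, findSub, runB, List.isPrefixOf]
  | cons c t ih =>
    obtain ⟨ih5, ih6, ih7⟩ := ih
    refine ⟨?_, ?_, ?_⟩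
    · by_cases hd : c = '-'
      · subst hd
        rw [show runB 5 ('-' :: t) = '-' :: runB 6 t from rfl, ih6, comRes0_dash]
      · rw [runB_cons]
        have hs : stepB 5 c = (5, c) := by simp [stepB, hd]
        rw [hs, ih5, comRes0_other t hd]
    · by_cases hd : c = '-'
      · subst hd
        rw [show runB 6 ('-' :: t) = '-' :: runB 7 t from rfl, ih7, comRes1_dash]
      · rw [runB_cons]
        have hs : stepB 6 c = (5, c) := by simp [stepB, hd]
        rw [hs, ih5, comRes1_other t hd]
    · by_cases hg : c = '>'
      · subst hg
        rw [show runB 7 ('>' :: t) = '>' :: runB 0 t from rfl, comRes2_gt]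
      · by_cases hd : c = '-'
        · subst hd
          rw [show runB 7 ('-' :: t) = '-' :: runB 7 t from rfl, ih7, comRes2_dash]
        · rw [runB_cons]
          have hs : stepB 7 c = (5, c) := by simp [stepB, hg, hd]
          rw [hs, ih5, comRes2_other t hg hd]

theorem runB_o3 (t : List Char) (ht : ¬ (['-'] : List Char).isPrefixOf t) :
    runB 3 t = tagRes t := by
  cases t with
  | nil => simp [tagRes, findSub, runB]
  | cons c u =>
    have hd : ¬ c = '-' := by
      intro h; subst h; simp [List.isPrefixOf] at ht
    by_cases hg : c = '>'
    · subst hg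
      rw [show runB 3 ('>' :: u) = '>' :: runB 0 u from rfl, tagRes_gt]
    · rw [runB_cons]
      have hs : stepB 3 c = (4, c) := by simp [stepB, hd, hg]
      rw [hs, runB_tag, tagRes_cons u hg]

theorem runB_o2 (t : List Char) (ht : ¬ (['-', '-'] : List Char).isPrefixOf t) :
    runB 2 t = tagRes t := by
  cases t with
  | nil => simp [tagRes, findSub, runB]
  | cons c u =>
    by_cases hd : c = '-'
    · subst hd
      have hu : ¬ (['-'] : List Char).isPrefixOf u := by
        intro h
        rw [← prefixOf_cons_same '-' ['-'] u] at h
        exact ht h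
      rw [show runB 2 ('-' :: u) = '-' :: runB 3 u from rfl, runB_o3 u hu,
        tagRes_cons u (by decide)]
    · by_cases hg : c = '>'
      · subst hg
        rw [show runB 2 ('>' :: u) = '>' :: runB 0 u from rfl, tagRes_gt]
      · rw [runB_cons]
        have hs : stepB 2 c = (4, c) := by simp [stepB, hd, hg]
        rw [hs, runB_tag, tagRes_cons u hg]

theorem runB_o1 (t : List Char) (ht : ¬ (['!', '-', '-'] : List Char).isPrefixOf t) :
    runB 1 t = tagRes t := by
  cases t with
  | nil => simp [tagRes, findSub, runB]
  | cons c u =>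
    by_cases hb : c = '!'
    · subst hb
      have hu : ¬ (['-', '-'] : List Char).isPrefixOf u := by
        intro h
        rw [← prefixOf_cons_same '!' ['-', '-'] u] at h
        exact ht h
      rw [show runB 1 ('!' :: u) = '!' :: runB 2 u from rfl, runB_o2 u hu,
        tagRes_cons u (by decide)]
    · by_cases hg : c = '>'
      · subst hg
        rw [show runB 1 ('>' :: u) = '>' :: runB 0 u from rfl, tagRes_gt]
      · rw [runB_cons]
        have hs : stepB 1 c = (4, c) := by simp [stepB, hb, hg]
        rw [hs, runB_tag, tagRes_cons u hg]

theorem normA_eq_runB : ∀ cs : List Char, normA cs = runB 0 cs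
  | [] => by simp [normA, runB]
  | c :: cs => by
    rw [normA]
    by_cases h4 : (c :: cs).take 4 = ['<', '!', '-', '-']
    · -- comment opener: c = '<', cs = '!' :: '-' :: '-' :: r
      obtain ⟨hc, r, hr⟩ : c = '<' ∧ ∃ r, cs = '!' :: '-' :: '-' :: r := by
        cases cs with
        | nil => simp at h4
        | cons a t =>
          cases t with
          | nil => simp at h4
          | cons b t2 =>
            cases t2 with
            | nil => simp at h4
            | cons e t3 =>
              simp only [List.take_succ_cons] at h4
              obtain ⟨h1, h2, h3, h5⟩ := by simpa using h4
              exact ⟨h1, t3, by simp [h2, h3, h5]⟩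
      subst hc; subst hr
      simp only [h4, if_true, List.drop_succ_cons, List.drop_zero]
      rw [show runB 0 ('<' :: '!' :: '-' :: '-' :: r)
            = '<' :: '!' :: '-' :: '-' :: runB 5 r from rfl, (runB_com r).1]
      simp only [comRes, List.replicate, List.nil_append]
      cases hf : findSub ['-', '-', '>'] r with
      | none => simp
      | some k =>
        have hIH := normA_eq_runB (r.drop (k + 3))
        have h7 : ('<' :: '!' :: '-' :: '-' :: r).take (7 + k)
            = '<' :: '!' :: '-' :: '-' :: r.take (k + 3) := by
          rw [show 7 + k = ((((k + 3) + 1) + 1) + 1) + 1 by omega]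
          simp [List.take_succ_cons]
        have h7' : ('<' :: '!' :: '-' :: '-' :: r).drop (7 + k) = r.drop (k + 3) := by
          rw [show 7 + k = ((((k + 3) + 1) + 1) + 1) + 1 by omega]
          simp [List.drop_succ_cons]
        simp [h7, h7', hIH]
    · simp only [h4, if_false]
      by_cases hc : c = '<'
      · subst hc
        have hns : ¬ (['!', '-', '-'] : List Char).isPrefixOf cs := by
          intro h
          apply h4
          obtain ⟨t, ht⟩ := List.isPrefixOf_iff_prefix.mp h
          rw [← ht]; rfl
        simp only [if_true]
        rw [show runB 0 ('<' :: cs) = '<' :: runB 1 cs from rfl, runB_o1 cs hns]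
        simp only [tagRes]
        cases hf : findSub ['>'] cs with
        | none => simp
        | some k =>
          have hIH := normA_eq_runB (cs.drop (k + 1))
          have h2 : ('<' :: cs).take (k + 2) = '<' :: cs.take (k + 1) := by
            rw [show k + 2 = (k + 1) + 1 by omega, List.take_succ_cons]
          have h3 : ('<' :: cs).drop (k + 2) = cs.drop (k + 1) := by
            rw [show k + 2 = (k + 1) + 1 by omega, List.drop_succ_cons]
          simp [h2, h3, hIH]
      · by_cases hm : c = ','
        · subst hm
          simp only [if_true, if_neg hc]
          rw [normA_eq_runB cs]
          rfl
        · simp only [if_neg hc, if_neg hm]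
          rw [normA_eq_runB cs]
          rw [runB_cons]
          have hs : stepB 0 c = (0, c) := by simp [stepB, hc, hm]
          rw [hs]
termination_by cs => cs.length
decreasing_by all_goals (simp_all; try omega)

-- ===== VERDICT (by name: the statement is the Claim_ definition above) =====
theorem normalize_commas_py_spec : Claim_equal_normalize_commas_py := by
  intro content _
  unfold Spec_normalize_commas_py normalize_commas_py normalize_commas_py_alt
  rw [normA_eq_runB]
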